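-- pv_equiv track=rewrite | github.com/hectorJesusGQ/ProyectoTaller3 | P3Descompresor.py | decodificador
-- ===== SOURCE A (Python) =====
-- def decodificador(codedTXT, codigos):
--     currentCode = ""
--     decodedTXT = ""
--     for bit in codedTXT:
--         currentCode += bit
--         if currentCode in codigos:
--             decodedTXT += codigos[currentCode]
--             currentCode = ""
--     return decodedTXT
-- ===== SOURCE B (Python) =====
-- def decodificador(codedTXT, codigos):
--     # Build a prefix trie once: node = [symbol-or-None, {char: child}].
--     # On duplicate codes the first mapping wins (same as first-match lookup).
--     root = [None, {}]
--     for code in codigos: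
--         n = root
--         for ch in code:
--             n = n[1].setdefault(ch, [None, {}])
--         if n[0] is None:
--             n[0] = codigos[code]
--     # Single descent over the bits; a missing edge enters an absorbing dead
--     # state (None) that emits nothing, matching the silent discard.
--     out = ""
--     cur = root
--     for bit in codedTXT:
--         if cur is None:
--             continue
--         cur = cur[1].get(bit)
--         if cur is not None and cur[0] is not None:
--             out += cur[0]
--             cur = root
--     return out
-- ===== Notes on version B (the rewrite author's own statement) =====
-- stated objective: alternative
-- what changed: Replaces A's per-bit growing-prefix string plus dict membership/lookup with a prefix trie built once from the codes and a single pointer descent over the bits (missing edge = absorbing dead state).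
import Mathlib
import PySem

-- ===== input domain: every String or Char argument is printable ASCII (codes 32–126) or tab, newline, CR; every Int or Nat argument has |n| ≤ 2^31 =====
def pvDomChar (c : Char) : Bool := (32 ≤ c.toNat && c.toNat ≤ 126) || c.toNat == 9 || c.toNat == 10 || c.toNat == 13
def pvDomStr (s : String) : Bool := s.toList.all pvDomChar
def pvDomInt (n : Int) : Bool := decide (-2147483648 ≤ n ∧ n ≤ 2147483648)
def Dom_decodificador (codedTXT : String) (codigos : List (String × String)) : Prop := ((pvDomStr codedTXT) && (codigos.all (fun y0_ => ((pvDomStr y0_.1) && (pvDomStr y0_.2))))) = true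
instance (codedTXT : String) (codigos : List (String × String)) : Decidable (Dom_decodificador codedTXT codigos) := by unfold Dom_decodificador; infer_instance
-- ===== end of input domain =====

-- B replaces A's per-bit growing-prefix dict lookup with a prefix trie built
-- once and a single descent over the bits (alternative data structure).

-- ===== PORT A =====
-- first-match association-list lookup (the dict `codigos`); keys as char lists
def lookupA (codigos : List (String × String)) (k : List Char) : Option String :=
  match codigos with
  | [] => none
  | (a, b) :: rest => if a.toList = k then some b else lookupA rest k

def decodificador (codedTXT : String) (codigos : List (String × String)) : String :=
  (codedTXT.toList.foldl
    (fun (st : List Char × String) bit =>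
      let cur := st.1 ++ [bit]
      match lookupA codigos cur with
      | some v => ([], st.2 ++ v)
      | none => (cur, st.2))
    ([], "")).2

-- ===== PORT B =====
mutual
inductive PVTrie where
  | node : Option String → PVEdges → PVTrie
inductive PVEdges where
  | nil : PVEdges
  | cons : Char → PVTrie → PVEdges → PVEdges
end

def pvFindEdge : PVEdges → Char → Option PVTrie
  | .nil, _ => none
  | .cons d t rest, c => if d = c then some t else pvFindEdge rest c

def pvSetEdge : PVEdges → Char → PVTrie → PVEdges
  | .nil, c, t => .cons c t .nil
  | .cons d u rest, c, t => if d = c then .cons d t rest else .cons d u (pvSetEdge rest c t)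

-- insert one (code, symbol) pair; an already-set symbol is kept (first wins)
def pvInsert : PVTrie → List Char → String → PVTrie
  | .node o e, [], v => .node (o.or (some v)) e
  | .node o e, c :: cs, v =>
      .node o (pvSetEdge e c (pvInsert ((pvFindEdge e c).getD (.node none .nil)) cs v))

def pvBuild (codigos : List (String × String)) : PVTrie :=
  codigos.foldl (fun t kv => pvInsert t kv.1.toList kv.2) (.node none .nil)

-- one descent step; state = (current node or dead, output so far)
def pvStep (root : PVTrie) (st : Option PVTrie × String) (c : Char) : Option PVTrie × String :=
  match st.1 with
  | none => st
  | some (.node _ e) =>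
      match pvFindEdge e c with
      | none => (none, st.2)
      | some t' =>
          match t' with
          | .node (some v) _ => (some root, st.2 ++ v)
          | .node none _ => (some t', st.2)

def decodificador_alt (codedTXT : String) (codigos : List (String × String)) : String :=
  let root := pvBuild codigos
  (codedTXT.toList.foldl (pvStep root) (some root, "")).2

-- ===== PRECONDITION & SPEC =====
def Spec_decodificador (codedTXT : String) (codigos : List (String × String)) (out : String) : Prop := out = decodificador_alt codedTXT codigos
instance (codedTXT : String) (codigos : List (String × String)) (out : String) : Decidable (Spec_decodificador codedTXT codigos out) := by unfold Spec_decodificador; infer_instance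

-- ===== CLAIM (what is proved, stated in full; the proofs are below) =====
def Claim_equal_decodificador : Prop := ∀ (codedTXT : String) (codigos : List (String × String)), Dom_decodificador codedTXT codigos → Spec_decodificador codedTXT codigos (decodificador codedTXT codigos)

-- ===== LEMMAS AND PROOFS =====

def pvWalk : PVTrie → List Char → Option PVTrie
  | t, [] => some t
  | .node _ e, c :: cs =>
      match pvFindEdge e c with
      | none => none
      | some t' => pvWalk t' cs

def pvTerm : Option PVTrie → Option String
  | none => none
  | some (.node o _) => o

theorem pvFindEdge_setEdge : ∀ (e : PVEdges) (c d : Char) (t : PVTrie),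
    pvFindEdge (pvSetEdge e c t) d = if d = c then some t else pvFindEdge e d
  | .nil, c, d, t => by
      simp only [pvSetEdge, pvFindEdge]
      by_cases h : c = d <;> simp [h, eq_comm]
  | .cons d' u rest, c, d, t => by
      simp only [pvSetEdge]
      by_cases h : d' = c
      · subst h
        by_cases h2 : d' = d
        · subst h2; simp [pvFindEdge]
        · simp [pvFindEdge, h2, Ne.symm h2]
      · by_cases h2 : d' = d
        · subst h2
          simp [pvFindEdge, h]
        · simp [pvFindEdge, h, h2, pvFindEdge_setEdge rest c d t]

theorem pvTerm_walk_fresh (x : List Char) :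
    pvTerm (pvWalk (.node none .nil) x) = none := by
  cases x with
  | nil => rfl
  | cons c cs => simp [pvWalk, pvFindEdge, pvTerm]

theorem pvTerm_walk_insert (k : List Char) (t : PVTrie) (v : String) (p : List Char) :
    pvTerm (pvWalk (pvInsert t k v) p)
      = if p = k then (pvTerm (pvWalk t k)).or (some v) else pvTerm (pvWalk t p) := by
  induction k generalizing t p with
  | nil =>
    obtain ⟨o, e⟩ := t
    cases p with
    | nil => simp [pvInsert, pvWalk, pvTerm]
    | cons d ds =>
      simp only [pvInsert, pvWalk]
      cases pvFindEdge e d <;> simp [pvTerm]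
  | cons c cs ih =>
    obtain ⟨o, e⟩ := t
    cases p with
    | nil => simp [pvInsert, pvWalk, pvTerm]
    | cons d ds =>
      by_cases hd : d = c
      · subst hd
        simp only [pvInsert, pvWalk]
        rw [pvFindEdge_setEdge, if_pos rfl]
        dsimp only
        rw [ih]
        cases hf : pvFindEdge e d with
        | some ch =>
          simp only [Option.getD_some]
          by_cases hds : ds = cs <;> simp [hds]
        | none =>
          simp only [Option.getD_none]
          rw [pvTerm_walk_fresh cs, pvTerm_walk_fresh ds]
          by_cases hds : ds = cs <;> simp [hds, pvTerm]
      · have hne : (d :: ds) ≠ (c :: cs) := by simp [hd]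
        simp only [pvInsert, pvWalk]
        rw [pvFindEdge_setEdge, if_neg hd, if_neg hne]

theorem pvTerm_walk_foldl (codigos : List (String × String)) :
    ∀ (t : PVTrie) (p : List Char),
      pvTerm (pvWalk (codigos.foldl (fun t kv => pvInsert t kv.1.toList kv.2) t) p)
        = (pvTerm (pvWalk t p)).or (lookupA codigos p) := by
  induction codigos with
  | nil =>
    intro t p
    simp only [List.foldl_nil, lookupA]
    generalize pvTerm (pvWalk t p) = x
    cases x <;> simp [Option.or]
  | cons kv rest ih =>
    intro t p
    obtain ⟨a, b⟩ := kv
    by_cases h : a.toList = p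
    · subst h
      simp only [List.foldl_cons, ih, pvTerm_walk_insert, lookupA]
      generalize pvTerm (pvWalk t a.toList) = x
      cases x <;> simp [Option.or]
    · have h2 : ¬ p = a.toList := fun hh => h hh.symm
      simp only [List.foldl_cons, ih, pvTerm_walk_insert, lookupA, if_neg h, if_neg h2]

theorem pvTerm_walk_build (codigos : List (String × String)) (p : List Char) :
    pvTerm (pvWalk (pvBuild codigos) p) = lookupA codigos p := by
  unfold pvBuild
  rw [pvTerm_walk_foldl, pvTerm_walk_fresh, Option.none_or]

theorem pvWalk_append (cur : List Char) (t : PVTrie) (c : Char) :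
    pvWalk t (cur ++ [c])
      = match pvWalk t cur with
        | none => none
        | some (.node _ e) => pvFindEdge e c := by
  induction cur generalizing t with
  | nil =>
    obtain ⟨o, e⟩ := t
    simp only [List.nil_append, pvWalk]
    cases pvFindEdge e c <;> simp [pvWalk]
  | cons d ds ih =>
    obtain ⟨o, e⟩ := t
    simp only [List.cons_append, pvWalk]
    cases pvFindEdge e d <;> simp [ih]

theorem pvSim (codigos : List (String × String)) (bits : List Char) :
    ∀ (cur : List Char) (out : String),
      (bits.foldl
        (fun (st : List Char × String) bit =>
          let c := st.1 ++ [bit]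
          match lookupA codigos c with
          | some v => ([], st.2 ++ v)
          | none => (c, st.2))
        (cur, out)).2
      = (bits.foldl (pvStep (pvBuild codigos)) (pvWalk (pvBuild codigos) cur, out)).2 := by
  induction bits with
  | nil => intro cur out; rfl
  | cons c rest ih =>
    intro cur out
    simp only [List.foldl_cons]
    have hlk : lookupA codigos (cur ++ [c]) = pvTerm (pvWalk (pvBuild codigos) (cur ++ [c])) :=
      (pvTerm_walk_build codigos (cur ++ [c])).symm
    cases hw : pvWalk (pvBuild codigos) cur with
    | none =>
      have hw' : pvWalk (pvBuild codigos) (cur ++ [c]) = none := by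
        rw [pvWalk_append, hw]
      rw [hlk, hw']
      simp only [pvTerm, pvStep]
      rw [ih (cur ++ [c]) out, hw']
    | some t =>
      obtain ⟨o, e⟩ := t
      have hw' : pvWalk (pvBuild codigos) (cur ++ [c]) = pvFindEdge e c := by
        rw [pvWalk_append, hw]
      cases hf : pvFindEdge e c with
      | none =>
        rw [hlk, hw', hf]
        simp only [pvTerm, pvStep, hf]
        rw [ih (cur ++ [c]) out, hw', hf]
      | some t' =>
        obtain ⟨o', e'⟩ := t'
        rw [hlk, hw', hf]
        cases o' with
        | some v =>
          simp only [pvTerm, pvStep, hf]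
          rw [ih [] (out ++ v)]
          rfl
        | none =>
          simp only [pvTerm, pvStep, hf]
          rw [ih (cur ++ [c]) out, hw', hf]

-- ===== VERDICT (by name: the statement is the Claim_ definition above) =====
theorem decodificador_spec : Claim_equal_decodificador := by
  intro codedTXT codigos _
  unfold Spec_decodificador decodificador decodificador_alt
  have h := pvSim codigos codedTXT.toList [] ""
  simpa using h
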